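-- pv_equiv track=rewrite | github.com/Lee-HT/Lee_HT-programmers | 2024_Kakao_n+1_cardgame.py | removed
-- ===== SOURCE A (Python) =====
-- def removed(lists):
--     num = 0
--     for i in range(len(lists)):
--         if lists[i] in lists[i+1:]:
--             num = lists[i]
--             break
--     if num != 0:
--         return [i for i in lists if i != num] , True
--     else:
--         return [], False
-- ===== SOURCE B (Python) =====
-- def removed(lists):
--     seen = set()
--     num = 0
--     for x in reversed(lists):
--         if x in seen:
--             num = x
--         seen.add(x)
--     if num != 0:
--         return [i for i in lists if i != num], True
--     else:
--         return [], False
-- ===== Notes on version B (the rewrite author's own statement) =====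
-- stated objective: alternative
-- what changed: Replaces A's per-index suffix re-scan with early break (lists[i] in lists[i+1:]) by a single full right-to-left pass maintaining a 'seen' hash set, overwriting a candidate so the leftmost value with a later duplicate wins; A's tail (the != 0 filter) is kept unchanged.
import Mathlib
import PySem

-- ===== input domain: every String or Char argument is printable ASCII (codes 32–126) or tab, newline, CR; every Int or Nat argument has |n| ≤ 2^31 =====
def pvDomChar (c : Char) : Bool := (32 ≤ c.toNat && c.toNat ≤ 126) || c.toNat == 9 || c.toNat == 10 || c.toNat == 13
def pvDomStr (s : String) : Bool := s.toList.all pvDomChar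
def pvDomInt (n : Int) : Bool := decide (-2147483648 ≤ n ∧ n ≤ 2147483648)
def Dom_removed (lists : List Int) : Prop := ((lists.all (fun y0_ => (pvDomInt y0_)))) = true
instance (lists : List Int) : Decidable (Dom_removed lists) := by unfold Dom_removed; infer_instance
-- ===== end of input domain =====

-- B replaces A's per-index suffix re-scan (with break) by one full right-to-left pass with a seen-set; same cost in practice.

-- ===== PORT A =====
-- A's loop: first lists[i] with lists[i] in lists[i+1:], else num stays 0 (break modeled by recursion).
def removedNumA : List Int → Int
  | [] => 0
  | x :: rest => if x ∈ rest then x else removedNumA rest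

def removed (lists : List Int) : List Int × Bool :=
  let num := removedNumA lists
  if num ≠ 0 then (lists.filter (fun i => i ≠ num), true) else ([], false)

-- ===== PORT B =====
-- B's loop over reversed(lists): check seen before adding, overwrite num on each hit.
def removed_alt (lists : List Int) : List Int × Bool :=
  let st := lists.reverse.foldl
    (fun (st : PySem.Set Int × Int) x =>
      (PySem.Set.add st.1 x, if PySem.Set.contains st.1 x then x else st.2))
    (PySem.Set.empty, 0)
  let num := st.2
  if num ≠ 0 then (lists.filter (fun i => i ≠ num), true) else ([], false)

-- ===== PRECONDITION & SPEC =====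
def Spec_removed (lists : List Int) (out : List Int × Bool) : Prop := out = removed_alt lists
instance (lists : List Int) (out : List Int × Bool) : Decidable (Spec_removed lists out) := by unfold Spec_removed; infer_instance

-- ===== CLAIM (what is proved, stated in full; the proofs are below) =====
def Claim_equal_removed : Prop := ∀ (lists : List Int), Dom_removed lists → Spec_removed lists (removed lists)

-- ===== LEMMAS AND PROOFS =====
lemma fold_char (l : List Int) :
    l.reverse.foldl
      (fun (st : PySem.Set Int × Int) x =>
        (PySem.Set.add st.1 x, if PySem.Set.contains st.1 x then x else st.2))
      (PySem.Set.empty, 0)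
    = (PySem.Set.ofList l.reverse, removedNumA l) := by
  induction l with
  | nil => rfl
  | cons x rest ih =>
    have : (x :: rest).reverse = rest.reverse ++ [x] := by simp
    rw [this, List.foldl_append, ih, PySem.Set.ofList_append_singleton]
    simp only [removedNumA]
    by_cases hx : x ∈ rest
    · simp [hx]
    · simp [hx]

-- ===== VERDICT (by name: the statement is the Claim_ definition above) =====
theorem removed_spec : Claim_equal_removed := by
  intro lists _
  unfold Spec_removed removed removed_alt
  rw [fold_char]
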